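-- pv_equiv track=rewrite | github.com/mtak0235/helloPython | StepByStep/기본수학1/hmoon/2839.py | solve
-- ===== SOURCE A (Python) =====
-- def solve(N, temp):
--     for i in range(1, (N // 3) + 1):
--         j = 0
--         for j in range(0, (N // 5) + 1):
--             temp = (i * 3) + (j * 5)
--             if (N == temp):
--                 return (i + j)
--     return (-1)
-- ===== SOURCE B (Python) =====
-- def solve(N, temp):
--     # A returns, for the smallest i >= 1 with 3*i + 5*j == N solvable (j >= 0),
--     # the count i + j; i is determined mod 5 (i ≡ 2N mod 5), so compute it directly.
--     i = (2 * N) % 5 or 5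
--     if 3 * i <= N:
--         return i + (N - 3 * i) // 5
--     return -1
-- ===== Notes on version B (the rewrite author's own statement) =====
-- stated objective: faster
-- what changed: Replaced the O(N^2) nested search over (i, j) by modular arithmetic: the smallest feasible i >= 1 is determined by N mod 5, so B computes the answer in O(1).
import Mathlib
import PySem

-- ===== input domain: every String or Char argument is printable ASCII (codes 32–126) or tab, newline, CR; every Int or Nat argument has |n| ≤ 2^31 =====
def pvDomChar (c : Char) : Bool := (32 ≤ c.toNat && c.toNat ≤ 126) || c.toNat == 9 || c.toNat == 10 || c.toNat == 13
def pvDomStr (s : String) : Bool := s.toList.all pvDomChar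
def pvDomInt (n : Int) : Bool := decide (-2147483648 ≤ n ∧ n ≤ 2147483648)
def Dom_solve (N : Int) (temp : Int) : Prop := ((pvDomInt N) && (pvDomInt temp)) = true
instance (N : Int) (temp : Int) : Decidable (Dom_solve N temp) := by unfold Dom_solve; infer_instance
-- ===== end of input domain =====

-- B replaces A's O(N^2) nested (i, j) search by an O(1) modular-arithmetic computation of the first feasible i.


-- ===== PORT A =====
-- inner 'for j in range(...): temp = (i*3)+(j*5); if N == temp: return i+j'
def solveInner (N : Int) (i : Int) : List Int → Option Int
  | [] => none
  | j :: rest =>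
    let temp := (i * 3) + (j * 5)
    if N = temp then some (i + j) else solveInner N i rest

-- outer 'for i in range(1, N//3+1): …'
def solveOuter (N : Int) : List Int → Option Int
  | [] => none
  | i :: rest =>
    match solveInner N i (PySem.List.pyRange 0 (PySem.Int.floordiv N 5 + 1) 1) with
    | some v => some v
    | none => solveOuter N rest

def solve (N : Int) (temp : Int) : Int :=
  match solveOuter N (PySem.List.pyRange 1 (PySem.Int.floordiv N 3 + 1) 1) with
  | some v => v
  | none => -1

-- ===== PORT B =====
def solve_alt (N : Int) (temp : Int) : Int :=
  let r := PySem.Int.mod (2 * N) 5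
  let i := if r = 0 then 5 else r   -- Python 'r or 5'
  if 3 * i ≤ N then i + PySem.Int.floordiv (N - 3 * i) 5 else -1

-- ===== PRECONDITION & SPEC =====
def Spec_solve (N : Int) (temp : Int) (out : Int) : Prop := out = solve_alt N temp
instance (N : Int) (temp : Int) (out : Int) : Decidable (Spec_solve N temp out) := by unfold Spec_solve; infer_instance

-- ===== CLAIM (what is proved, stated in full; the proofs are below) =====
def Claim_equal_solve : Prop := ∀ (N : Int) (temp : Int), Dom_solve N temp → Spec_solve N temp (solve N temp)

-- ===== LEMMAS AND PROOFS =====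

-- B's candidate first i (stated with emod; equals B's PySem.Int.mod since 5 > 0)
def cand (N : Int) : Int := if (2 * N) % 5 = 0 then 5 else (2 * N) % 5

lemma cand_bounds (N : Int) : 1 ≤ cand N ∧ cand N ≤ 5 := by
  unfold cand; split <;> omega

lemma cand_dvd (N : Int) : 5 ∣ N - 3 * cand N := by
  unfold cand; split <;> omega

lemma cand_min (N i : Int) (hi : 1 ≤ i) (h5 : 5 ∣ N - 3 * i) : cand N ≤ i := by
  unfold cand; split <;> omega

lemma alt_eq (N temp : Int) :
    solve_alt N temp = if 3 * cand N ≤ N then cand N + (N - 3 * cand N) / 5 else -1 := by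
  unfold solve_alt cand
  simp only [PySem.Int.mod_eq_emod_of_pos (by norm_num : (0:Int) < 5),
    PySem.Int.floordiv_eq_ediv_of_pos (by norm_num : (0:Int) < 5)]

lemma inner_none (N i : Int) (l : List Int) (h : ∀ j ∈ l, N ≠ (i * 3) + (j * 5)) :
    solveInner N i l = none := by
  induction l with
  | nil => rfl
  | cons j rest ih =>
    simp only [solveInner]
    rw [if_neg (h j (List.mem_cons_self ..))]
    exact ih fun j' hj' => h j' (List.mem_cons_of_mem _ hj')

lemma inner_range_none (N i : Int) (h5 : ¬ 5 ∣ N - 3 * i) :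
    solveInner N i (PySem.List.pyRange 0 (PySem.Int.floordiv N 5 + 1) 1) = none := by
  apply inner_none
  intro j _
  omega

lemma inner_append (N i : Int) (l1 l2 : List Int) (h : ∀ j ∈ l1, N ≠ (i * 3) + (j * 5)) :
    solveInner N i (l1 ++ l2) = solveInner N i l2 := by
  induction l1 with
  | nil => rfl
  | cons j rest ih =>
    simp only [List.cons_append, solveInner]
    rw [if_neg (h j (List.mem_cons_self ..))]
    exact ih fun j' hj' => h j' (List.mem_cons_of_mem _ hj')

lemma inner_range_some (N i : Int) (hi : 1 ≤ i) (h3 : 3 * i ≤ N)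
    (h5 : 5 ∣ N - 3 * i) :
    solveInner N i (PySem.List.pyRange 0 (PySem.Int.floordiv N 5 + 1) 1)
      = some (i + (N - 3 * i) / 5) := by
  obtain ⟨c, hc⟩ := h5
  have hcval : (N - 3 * i) / 5 = c := by omega
  have hc0 : (0:Int) ≤ c := by omega
  rw [PySem.Int.floordiv_eq_ediv_of_pos (by norm_num : (0:Int) < 5)]
  rw [PySem.List.pyRange_one_append 0 c (N / 5 + 1) hc0 (by omega)]
  rw [inner_append N i _ _ ?side]
  case side =>
    intro j hj
    rw [PySem.List.mem_pyRange_one] at hj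
    omega
  rw [PySem.List.pyRange_one_cons (by omega : c < N / 5 + 1)]
  simp only [solveInner]
  rw [if_pos (by omega), hcval]

lemma outer_append (N : Int) (l1 l2 : List Int)
    (h : ∀ i ∈ l1, solveInner N i (PySem.List.pyRange 0 (PySem.Int.floordiv N 5 + 1) 1) = none) :
    solveOuter N (l1 ++ l2) = solveOuter N l2 := by
  induction l1 with
  | nil => rfl
  | cons i rest ih =>
    simp only [List.cons_append, solveOuter]
    rw [h i (List.mem_cons_self ..)]
    exact ih fun i' hi' => h i' (List.mem_cons_of_mem _ hi')

lemma outer_none (N : Int) (l : List Int)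
    (h : ∀ i ∈ l, solveInner N i (PySem.List.pyRange 0 (PySem.Int.floordiv N 5 + 1) 1) = none) :
    solveOuter N l = none := by
  induction l with
  | nil => rfl
  | cons i rest ih =>
    simp only [solveOuter]
    rw [h i (List.mem_cons_self ..)]
    exact ih fun i' hi' => h i' (List.mem_cons_of_mem _ hi')

-- ===== VERDICT (by name: the statement is the Claim_ definition above) =====
theorem solve_spec : Claim_equal_solve := by
  intro N temp _
  unfold Spec_solve
  rw [alt_eq]
  unfold solve
  by_cases hle : 3 * cand N ≤ N
  · -- cand N is the first i the outer loop accepts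
    have hb := cand_bounds N
    have hdv := cand_dvd N
    rw [PySem.Int.floordiv_eq_ediv_of_pos (by norm_num : (0:Int) < 3)]
    rw [PySem.List.pyRange_one_append 1 (cand N) (N / 3 + 1) (by omega) (by omega)]
    rw [outer_append N _ _ ?pre]
    case pre =>
      intro i hi
      rw [PySem.List.mem_pyRange_one] at hi
      apply inner_range_none
      intro h5
      have := cand_min N i hi.1 h5
      omega
    rw [PySem.List.pyRange_one_cons (by omega : cand N < N / 3 + 1)]
    simp only [solveOuter]
    rw [inner_range_some N (cand N) (by omega) hle hdv]
    rw [if_pos hle]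
  · -- no i qualifies: the outer loop falls through
    rw [outer_none N _ ?allnone]
    case allnone =>
      intro i hi
      rw [PySem.List.mem_pyRange_one] at hi
      apply inner_range_none
      intro h5
      have h1 := cand_min N i hi.1 h5
      have h3 : 3 * i ≤ N := by
        have := hi.2
        rw [PySem.Int.floordiv_eq_ediv_of_pos (by norm_num : (0:Int) < 3)] at this
        omega
      omega
    rw [if_neg hle]
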